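-- pv_equiv track=rewrite | github.com/kemechedzhiev/CodingamePuzzles | easy/prefix_code.py | decode_with_prefix
-- ===== SOURCE A (Python) =====
-- def decode_with_prefix(prefix_table, string_to_decode):
--     if len(prefix_table) == 0:
--         return 'DECODE FAIL AT INDEX 0'
--     text_buffer = ''
--     result_string = ''
--     max_len = max([len(elem) for elem in prefix_table.keys()])
--     for index, symbol in enumerate(string_to_decode):
--         text_buffer += symbol
--         if text_buffer in prefix_table.keys():
--             result_string += prefix_table[text_buffer]
--             text_buffer = ''
--             continue
--         if len(text_buffer) > max_len or index == len(string_to_decode) - 1: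
--             return f'DECODE FAIL AT INDEX {index - len(text_buffer) + 1}'
--     return result_string
-- ===== SOURCE B (Python) =====
-- def decode_with_prefix(prefix_table, string_to_decode):
--     if len(prefix_table) == 0:
--         return 'DECODE FAIL AT INDEX 0'
--     pieces = []
--     pos = 0
--     n = len(string_to_decode)
--     while pos < n:
--         best = None
--         for key, value in prefix_table.items():
--             if key and string_to_decode.startswith(key, pos) and (best is None or len(key) < len(best[0])):
--                 best = (key, value)
--         if best is None:
--             return f'DECODE FAIL AT INDEX {pos}'
--         pieces.append(best[1])
--         pos += len(best[0])
--     return ''.join(pieces)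
-- ===== Notes on version B (the rewrite author's own statement) =====
-- stated objective: alternative
-- what changed: A scans char-by-char growing a text buffer and testing it against the key set (failing once the buffer exceeds the longest key or the string ends); B decodes segment-by-segment, scanning the table once per segment for the shortest codeword that prefixes the remaining input, consuming it whole or failing at the segment start.
import Mathlib
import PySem

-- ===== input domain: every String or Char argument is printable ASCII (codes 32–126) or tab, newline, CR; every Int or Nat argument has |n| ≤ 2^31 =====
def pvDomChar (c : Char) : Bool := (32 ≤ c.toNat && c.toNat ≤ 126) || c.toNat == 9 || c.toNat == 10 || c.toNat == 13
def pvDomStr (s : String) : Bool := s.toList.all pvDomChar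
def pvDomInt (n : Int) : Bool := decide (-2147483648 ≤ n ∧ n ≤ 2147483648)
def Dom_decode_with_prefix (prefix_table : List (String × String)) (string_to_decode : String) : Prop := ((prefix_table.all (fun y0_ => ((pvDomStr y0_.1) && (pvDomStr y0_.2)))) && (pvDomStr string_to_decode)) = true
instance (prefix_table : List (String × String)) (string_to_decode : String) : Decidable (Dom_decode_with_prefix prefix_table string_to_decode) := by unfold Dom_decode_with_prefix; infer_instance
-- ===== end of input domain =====

-- B replaces A's char-by-char buffer scan with a per-segment scan of the code table for the
-- shortest matching codeword (objective: alternative; equal return value proved on all inputs).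

-- ===== PORT A =====
-- A's loop "for index, symbol in enumerate(string_to_decode)" with state (text_buffer, result_string);
-- the table is carried as its toList pairs, lookup/`in keys()` are first-match as per the dict convention.
def pvALoop (t : List (List Char × String)) (maxLen : Int) (n : Nat) :
    List Char → Nat → List Char → List Char → List Char
  | [], _, _, res => res
  | c :: rest, index, buf, res =>
    let buf' := buf ++ [c]
    if (t.map Prod.fst).contains buf' then
      pvALoop t maxLen n rest (index + 1) []
        (res ++ (((t.find? (fun p => p.1 == buf')).map Prod.snd).getD "").toList)
    else if ((buf'.length : Int) > maxLen) ∨ (index = n - 1) then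
      "DECODE FAIL AT INDEX ".toList ++ PySem.Int.toChars ((index : Int) - (buf'.length : Int) + 1)
    else
      pvALoop t maxLen n rest (index + 1) buf' res

def decode_with_prefix (prefix_table : List (String × String)) (string_to_decode : String) : String :=
  if prefix_table.length = 0 then "DECODE FAIL AT INDEX 0"
  else
    let t := prefix_table.map (fun p => (p.1.toList, p.2))
    -- max([len(elem) for elem in prefix_table.keys()]); the table is nonempty here, so max? is some
    let maxLen : Int := (PySem.List.max? (t.map (fun p => (p.1.length : Int))) (fun y => y)).getD 0
    let cs := string_to_decode.toList
    String.ofList (pvALoop t maxLen cs.length cs 0 [] [])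

-- ===== PORT B =====
-- `best is None or len(key) < len(best[0])`
def pvBBetter (best : Option (List Char × String)) (L : Nat) : Bool :=
  match best with
  | none => true
  | some q => decide (L < q.1.length)

-- the inner `for key, value in prefix_table.items()` loop keeping the shortest nonempty prefix match
def pvBFind (t : List (List Char × String)) (rest : List Char) : Option (List Char × String) :=
  t.foldl
    (fun best p =>
      if p.1 ≠ [] ∧ p.1 <+: rest ∧ pvBBetter best p.1.length = true then some p else best)
    none

-- needed by pvBLoop's termination: a found match is a nonempty prefix of the remaining input
theorem pvBFind_some (t : List (List Char × String)) (rest : List Char)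
    (p : List Char × String) (h : pvBFind t rest = some p) : p.1 ≠ [] ∧ p.1 <+: rest := by
  unfold pvBFind at h
  suffices H : ∀ (l : List (List Char × String)) (best : Option (List Char × String)),
      (∀ q, best = some q → q.1 ≠ [] ∧ q.1 <+: rest) →
      l.foldl (fun best p =>
        if p.1 ≠ [] ∧ p.1 <+: rest ∧ pvBBetter best p.1.length = true then some p else best)
        best = some p → p.1 ≠ [] ∧ p.1 <+: rest by
    exact H t none (by simp) h
  intro l
  induction l with
  | nil => intro best hb h; exact hb p h
  | cons a l ih =>
    intro best hb h
    simp only [List.foldl_cons] at h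
    refine ih _ ?_ h
    intro q hq
    by_cases hc : a.1 ≠ [] ∧ a.1 <+: rest ∧ pvBBetter best a.1.length = true
    · rw [if_pos hc] at hq; cases hq; exact ⟨hc.1, hc.2.1⟩
    · rw [if_neg hc] at hq; exact hb q hq

-- the outer `while pos < n` loop: consume the shortest matching codeword, or fail at pos
def pvBLoop (t : List (List Char × String)) : List Char → Nat → List (List Char) → List Char
  | [], _, acc => acc.flatten
  | c :: rest0, pos, acc =>
    match h : pvBFind t (c :: rest0) with
    | none => "DECODE FAIL AT INDEX ".toList ++ PySem.Int.toChars (pos : Int)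
    | some p =>
      pvBLoop t ((c :: rest0).drop p.1.length) (pos + p.1.length) (acc ++ [p.2.toList])
  termination_by s _ _ => s.length
  decreasing_by
    have hp := pvBFind_some t (c :: rest0) p h
    have h1 : 1 ≤ p.1.length := by
      cases hq : p.1 with
      | nil => exact absurd hq hp.1
      | cons x xs => simp
    simp only [List.length_drop, List.length_cons]
    omega

def decode_with_prefix_alt (prefix_table : List (String × String)) (string_to_decode : String) : String :=
  if prefix_table.length = 0 then "DECODE FAIL AT INDEX 0"
  else
    let t := prefix_table.map (fun p => (p.1.toList, p.2))
    String.ofList (pvBLoop t string_to_decode.toList 0 [])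

-- ===== PRECONDITION & SPEC =====
def Spec_decode_with_prefix (prefix_table : List (String × String)) (string_to_decode : String) (out : String) : Prop := out = decode_with_prefix_alt prefix_table string_to_decode
instance (prefix_table : List (String × String)) (string_to_decode : String) (out : String) : Decidable (Spec_decode_with_prefix prefix_table string_to_decode out) := by unfold Spec_decode_with_prefix; infer_instance

-- ===== CLAIM (what is proved, stated in full; the proofs are below) =====
def Claim_equal_decode_with_prefix : Prop := ∀ (prefix_table : List (String × String)) (string_to_decode : String), Dom_decode_with_prefix prefix_table string_to_decode → Spec_decode_with_prefix prefix_table string_to_decode (decode_with_prefix prefix_table string_to_decode)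

-- ===== LEMMAS AND PROOFS =====

-- equal-length prefixes of the same list are equal
theorem pv_prefix_eq_of_length (u l₁ l₂ : List Char) (h₁ : l₁ <+: u) (h₂ : l₂ <+: u)
    (hl : l₁.length = l₂.length) : l₁ = l₂ := by
  rw [List.prefix_iff_eq_take.mp h₁, List.prefix_iff_eq_take.mp h₂, hl]

-- once the best is already (a pair of) minimal length, the fold keeps it
theorem pvBFind_keep (u : List Char) (q : List Char × String) :
    ∀ (l : List (List Char × String)),
    (∀ p ∈ l, p.1 ≠ [] → p.1 <+: u → ¬ p.1.length < q.1.length) →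
    l.foldl (fun best p =>
      if p.1 ≠ [] ∧ p.1 <+: u ∧ pvBBetter best p.1.length = true then some p else best)
      (some q) = some q := by
  intro l
  induction l with
  | nil => intro _; rfl
  | cons a l ih =>
    intro hl
    simp only [List.foldl_cons]
    have hng : ¬ (a.1 ≠ [] ∧ a.1 <+: u ∧ pvBBetter (some q) a.1.length = true) := by
      rintro ⟨h1, h2, h3⟩
      simp only [pvBBetter, decide_eq_true_eq] at h3
      exact hl a List.mem_cons_self h1 h2 h3
    rw [if_neg hng]
    exact ih (fun p hp => hl p (List.mem_cons_of_mem _ hp))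

-- the fold finds exactly the first table pair whose key is key0, when key0 is a
-- nonempty prefix of u of minimal length among all nonempty prefix matches
theorem pvBFind_of_min (u key0 : List Char) (hk : key0 ≠ []) (hpre : key0 <+: u)
    (pr : List Char × String) (hpr : pr.1 = key0) :
    ∀ (l : List (List Char × String)) (best : Option (List Char × String)),
    (best = none ∨ ∃ q, best = some q ∧ key0.length < q.1.length) →
    (∀ p ∈ l, p.1 ≠ [] → p.1 <+: u → key0.length ≤ p.1.length) →
    l.find? (fun p => p.1 == key0) = some pr →
    l.foldl (fun best p =>
      if p.1 ≠ [] ∧ p.1 <+: u ∧ pvBBetter best p.1.length = true then some p else best)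
      best = some pr := by
  intro l
  induction l with
  | nil => intro best _ _ hf; simp at hf
  | cons a l ih =>
    intro best hbest hmin hf
    simp only [List.foldl_cons]
    by_cases ha : a.1 = key0
    · -- the head is the first key0 pair: find? returns it, the fold stores it and keeps it
      rw [List.find?_cons_of_pos (by simp [ha])] at hf
      have hae : a = pr := by injection hf
      subst hae
      have hcond : a.1 ≠ [] ∧ a.1 <+: u ∧ pvBBetter best a.1.length = true := by
        refine ⟨by rw [ha]; exact hk, by rw [ha]; exact hpre, ?_⟩
        rcases hbest with h | ⟨q, hq, hlt⟩
        · rw [h]; rfl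
        · rw [hq]; simp only [pvBBetter, decide_eq_true_eq]; rw [ha]; exact hlt
      rw [if_pos hcond]
      refine pvBFind_keep u a l (fun p hp hp1 hp2 => ?_)
      have := hmin p (List.mem_cons_of_mem _ hp) hp1 hp2
      rw [ha]; omega
    · rw [List.find?_cons_of_neg (by simp [ha])] at hf
      refine ih _ ?_ (fun p hp => hmin p (List.mem_cons_of_mem _ hp)) hf
      by_cases hcond : a.1 ≠ [] ∧ a.1 <+: u ∧ pvBBetter best a.1.length = true
      · rw [if_pos hcond]
        right
        refine ⟨a, rfl, ?_⟩
        have hle := hmin a List.mem_cons_self hcond.1 hcond.2.1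
        rcases Nat.lt_or_ge key0.length a.1.length with h | h
        · exact h
        · exact absurd (pv_prefix_eq_of_length u a.1 key0 hcond.2.1 hpre (by omega)) ha
      · rw [if_neg hcond]; exact hbest

-- when no nonempty key of the table is a prefix of u, the fold finds nothing
theorem pvBFind_none (u : List Char) :
    ∀ (l : List (List Char × String)),
    (∀ p ∈ l, p.1 ≠ [] → ¬ p.1 <+: u) →
    pvBFind l u = none := by
  intro l
  induction l with
  | nil => intro _; rfl
  | cons a l ih =>
    intro hl
    unfold pvBFind
    simp only [List.foldl_cons]
    have hng : ¬ (a.1 ≠ [] ∧ a.1 <+: u ∧ pvBBetter none a.1.length = true) := by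
      rintro ⟨h1, h2, _⟩
      exact hl a List.mem_cons_self h1 h2
    rw [if_neg hng]
    have := ih (fun p hp => hl p (List.mem_cons_of_mem _ hp))
    unfold pvBFind at this
    exact this

-- unfolding pvBLoop on a nonempty remainder, by the result of pvBFind
theorem pvBLoop_find_none (t : List (List Char × String)) (c : Char) (rest0 : List Char)
    (pos : Nat) (acc : List (List Char)) (h : pvBFind t (c :: rest0) = none) :
    pvBLoop t (c :: rest0) pos acc =
      "DECODE FAIL AT INDEX ".toList ++ PySem.Int.toChars (pos : Int) := by
  rw [pvBLoop]
  split
  · rfl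
  · rename_i p hp
    rw [h] at hp
    exact absurd hp (by simp)

theorem pvBLoop_find_some (t : List (List Char × String)) (c : Char) (rest0 : List Char)
    (pos : Nat) (acc : List (List Char)) (p : List Char × String)
    (h : pvBFind t (c :: rest0) = some p) :
    pvBLoop t (c :: rest0) pos acc =
      pvBLoop t ((c :: rest0).drop p.1.length) (pos + p.1.length) (acc ++ [p.2.toList]) := by
  rw [pvBLoop]
  split
  · rename_i hp
    rw [h] at hp
    exact absurd hp (by simp)
  · rename_i q hq
    rw [h] at hq
    cases hq
    rfl

-- the central simulation: A's char loop in a segment state (buffer b already read and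
-- unmatched) equals B's segment loop restarted at the segment start index - |b|
theorem pv_main (t : List (List Char × String)) (maxLen : Int)
    (hmaxk : ∀ p ∈ t, (p.1.length : Int) ≤ maxLen) (n : Nat) :
    ∀ (s b : List Char) (index : Nat) (acc : List (List Char)),
    index + s.length = n →
    b.length ≤ index →
    (b.length : Int) ≤ maxLen →
    (∀ j, 1 ≤ j → j ≤ b.length → ¬ (b.take j) ∈ t.map Prod.fst) →
    (s = [] → b = []) →
    pvALoop t maxLen n s index b acc.flatten = pvBLoop t (b ++ s) (index - b.length) acc := by
  intro s
  induction s with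
  | nil =>
    intro b index acc _ _ _ _ h3
    rw [h3 rfl]
    simp [pvALoop, pvBLoop]
  | cons c rest ih =>
    intro b index acc hn hbi hbm h1 _
    have hmax0 : (0 : Int) ≤ maxLen := le_trans (by positivity) hbm
    simp only [pvALoop]
    by_cases hmem : (t.map Prod.fst).contains (b ++ [c])
    · -- A matches buf' = b ++ [c]: B finds the same pair (shortest match), both advance
      rw [if_pos hmem]
      have hex : ∃ p ∈ t, (fun p => p.1 == (b ++ [c])) p = true := by
        simp only [List.contains_eq_mem, decide_eq_true_eq, List.mem_map] at hmem
        obtain ⟨p, hp, hpe⟩ := hmem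
        exact ⟨p, hp, by simp [hpe]⟩
      have hsome : (t.find? (fun p => p.1 == (b ++ [c]))).isSome := List.find?_isSome.mpr hex
      obtain ⟨pr, hfind⟩ := Option.isSome_iff_exists.mp hsome
      have hpr : pr.1 = b ++ [c] := by
        have := List.find?_some hfind
        simpa using this
      have hsplit : b ++ c :: rest = (b ++ [c]) ++ rest := by simp
      have hpre : (b ++ [c]) <+: (b ++ c :: rest) := by
        rw [hsplit]; exact List.prefix_append _ _
      have hmin : ∀ p ∈ t, p.1 ≠ [] → p.1 <+: (b ++ c :: rest) →
          (b ++ [c]).length ≤ p.1.length := by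
        intro p hp hne hpre'
        by_contra hlt
        simp only [List.length_append, List.length_cons, List.length_nil, not_le] at hlt
        have hle : p.1.length ≤ b.length := by omega
        have h1' : 1 ≤ p.1.length := by
          cases hq : p.1 with
          | nil => exact absurd hq hne
          | cons x xs => simp
        have hps := List.prefix_iff_eq_take.mp hpre'
        rw [List.take_append_of_le_length hle] at hps
        exact h1 p.1.length h1' hle (hps ▸ List.mem_map.mpr ⟨p, hp, rfl⟩)
      have hBfind : pvBFind t (b ++ c :: rest) = some pr := by
        unfold pvBFind
        exact pvBFind_of_min (b ++ c :: rest) (b ++ [c]) (by simp) hpre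
          pr hpr t none (Or.inl rfl) hmin hfind
      -- B takes one step consuming pr.1 = b ++ [c]
      obtain ⟨d, ds, hds⟩ : ∃ d ds, b ++ c :: rest = d :: ds := by
        cases hb : b with
        | nil => exact ⟨c, rest, by simp⟩
        | cons x xs => exact ⟨x, xs ++ c :: rest, by simp⟩
      rw [hds]
      rw [pvBLoop_find_some t d ds _ acc pr (hds ▸ hBfind)]
      rw [← hds]
      have hdrop : (b ++ c :: rest).drop pr.1.length = rest := by
        rw [hpr, hsplit, List.drop_left]
      have hlen : pr.1.length = b.length + 1 := by rw [hpr]; simp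
      rw [hdrop, hlen]
      have hpos : index - b.length + (b.length + 1) = index + 1 := by omega
      rw [hpos]
      -- A's new result string equals the flatten of B's new accumulator
      have hres : acc.flatten ++ (((t.find? (fun p => p.1 == (b ++ [c]))).map Prod.snd).getD "").toList
          = (acc ++ [pr.2.toList]).flatten := by
        rw [hfind]
        simp
      rw [hres]
      have := ih [] (index + 1) (acc ++ [pr.2.toList]) (by simp at hn ⊢; omega)
        (by simp) (by simpa using hmax0) (by intro j hj1 hj2; simp at hj2; omega)
        (fun _ => rfl)
      simpa using this
    · rw [if_neg hmem]
      by_cases hfail : (((b ++ [c]).length : Int) > maxLen) ∨ (index = n - 1)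
      · -- A fails at the segment start; B finds no match on this segment and fails there too
        rw [if_pos hfail]
        have hnone : pvBFind t (b ++ c :: rest) = none := by
          refine pvBFind_none (b ++ c :: rest) t ?_
          intro p hp hne hpre'
          have h1' : 1 ≤ p.1.length := by
            cases hq : p.1 with
            | nil => exact absurd hq hne
            | cons x xs => simp
          have hup := List.prefix_iff_eq_take.mp hpre'
          rcases Nat.lt_or_ge p.1.length (b.length + 1) with hlt | hge
          · -- p.1 is a nonempty prefix of b: excluded by the segment invariant
            have hle : p.1.length ≤ b.length := by omega
            rw [List.take_append_of_le_length hle] at hup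
            exact h1 p.1.length h1' hle (hup ▸ List.mem_map.mpr ⟨p, hp, rfl⟩)
          · rcases Nat.eq_or_lt_of_le hge with heq | hgt
            · -- p.1 = b ++ [c]: contradicts the failed membership test
              have hlen1 : p.1.length = (b ++ [c]).length := by simp; omega
              rw [show b ++ c :: rest = (b ++ [c]) ++ rest by simp, hlen1,
                List.take_left] at hup
              exact hmem (by
                have hm : p.1 ∈ t.map Prod.fst := List.mem_map.mpr ⟨p, hp, rfl⟩
                rw [hup] at hm
                simpa [List.contains_eq_mem] using hm)
            · -- p.1 longer than b ++ [c]: impossible under either failure reason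
              have hplen := hmaxk p hp
              rcases hfail with hf | hf
              · simp only [List.length_append, List.length_cons, List.length_nil] at hf
                omega
              · -- at the last index the segment is exactly b ++ [c]
                have hrest : rest = [] := by
                  have : rest.length = 0 := by simp at hn; omega
                  exact List.length_eq_zero_iff.mp this
                have hll : p.1.length ≤ (b ++ c :: rest).length := hpre'.length_le
                simp [hrest] at hll
                omega
        obtain ⟨d, ds, hds⟩ : ∃ d ds, b ++ c :: rest = d :: ds := by
          cases hb : b with
          | nil => exact ⟨c, rest, by simp⟩
          | cons x xs => exact ⟨x, xs ++ c :: rest, by simp⟩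
        rw [hds, pvBLoop_find_none t d ds _ acc (hds ▸ hnone)]
        have harith : ((index : Int) - ((b ++ [c]).length : Int) + 1)
            = ((index - b.length : Nat) : Int) := by
          simp only [List.length_append, List.length_cons, List.length_nil]
          omega
        rw [harith]
      · -- no match, no failure: A keeps scanning with the grown buffer, same segment for B
        rw [if_neg hfail]
        push Not at hfail
        have hrest : rest ≠ [] := by
          intro hr
          subst hr
          simp only [List.length_cons, List.length_nil] at hn
          exact hfail.2 (by omega)
        have := ih (b ++ [c]) (index + 1) acc
          (by simp at hn ⊢; omega)
          (by simp; omega)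
          (by simpa using hfail.1)
          (by
            intro j hj1 hj2
            simp only [List.length_append, List.length_cons, List.length_nil] at hj2
            rcases Nat.lt_or_ge j (b.length + 1) with hlt | hge
            · have hle : j ≤ b.length := by omega
              rw [List.take_append_of_le_length hle]
              exact h1 j hj1 hle
            · have hj : j = b.length + 1 := by omega
              rw [hj, show b.length + 1 = (b ++ [c]).length by simp, List.take_length]
              intro hmem'
              exact hmem (by simpa [List.contains_eq_mem] using hmem'))
          (fun hr => absurd hr hrest)
        rw [this]
        have hseg : (b ++ [c]) ++ rest = b ++ c :: rest := by simp
        have hposeq : index + 1 - (b ++ [c]).length = index - b.length := by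
          simp only [List.length_append, List.length_cons, List.length_nil]
          omega
        rw [hseg, hposeq]

-- ===== VERDICT (by name: the statement is the Claim_ definition above) =====
theorem decode_with_prefix_spec : Claim_equal_decode_with_prefix := by
  intro prefix_table string_to_decode _
  unfold Spec_decode_with_prefix decode_with_prefix decode_with_prefix_alt
  by_cases hempty : prefix_table.length = 0
  · rw [if_pos hempty, if_pos hempty]
  · rw [if_neg hempty, if_neg hempty]
    set t := prefix_table.map (fun p => (p.1.toList, p.2)) with ht
    set maxLen : Int := (PySem.List.max? (t.map (fun p => (p.1.length : Int))) (fun y => y)).getD 0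
      with hml
    have hmaxk : ∀ p ∈ t, (p.1.length : Int) ≤ maxLen := by
      intro p hp
      have hne : t.map (fun p => (p.1.length : Int)) ≠ [] := by
        intro h
        have : t = [] := by simpa using h
        rw [this] at hp
        simp at hp
      obtain ⟨m, hm⟩ := Option.ne_none_iff_exists'.mp
        (mt (PySem.List.max?_eq_none_iff (t.map (fun p => (p.1.length : Int))) (fun y => y)).mp hne)
      have := PySem.List.max?_isMax hm (p.1.length : Int)
        (List.mem_map_of_mem hp)
      rw [hml, hm]
      simpa using this
    have := pv_main t maxLen hmaxk string_to_decode.toList.length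
      string_to_decode.toList [] 0 [] (by simp) (by simp) (by
        by_cases hT : t = []
        · exfalso; apply hempty; simpa [ht] using hT
        · obtain ⟨p, hp⟩ := List.exists_mem_of_ne_nil t hT
          exact le_trans (by positivity) (hmaxk p hp))
      (by intro j hj1 hj2; simp at hj2; omega)
      (fun _ => rfl)
    simp only [List.flatten_nil, List.nil_append, List.length_nil, Nat.sub_zero] at this
    show String.ofList (pvALoop t maxLen string_to_decode.toList.length string_to_decode.toList 0 [] [])
      = String.ofList (pvBLoop t string_to_decode.toList 0 [])
    rw [this]
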